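-- pv_equiv track=rewrite | github.com/antovk/test-tasks | array-division/array_division_v1.py | solution
-- ===== SOURCE A (Python) =====
-- def solution(arr):
--     max_left = arr[0]
--     max_right = max(arr[1:])
--     max_diff = abs(max_left - max_right)
--
--     for i in range(1, len(arr) - 1):
--         max_left = max(max_left, arr[i])
--
--         if max_right == arr[i]:
--             max_right = max(arr[i + 1:])
--
--         max_diff = max(max_diff, abs(max_left - max_right))
--
--     return max_diff
-- ===== SOURCE B (Python) =====
-- def solution(arr):
--     # suffix maxima: suf[i] = max(arr[i:]), built in one backward pass
--     suf = arr[:]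
--     for i in range(len(arr) - 2, -1, -1):
--         suf[i] = max(suf[i], suf[i + 1])
--     best = abs(arr[0] - suf[1])
--     pref = arr[0]
--     for x, s in zip(arr[1:], suf[2:]):
--         pref = max(pref, x)
--         best = max(best, abs(pref - s))
--     return best
-- ===== Notes on version B (the rewrite author's own statement) =====
-- stated objective: faster
-- what changed: B precomputes a suffix-maximum array in one backward pass and then does a single forward pass with a running prefix maximum, instead of A's loop that re-scans the whole remaining suffix with max(arr[i+1:]) whenever the current suffix maximum is consumed.
import Mathlib
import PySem

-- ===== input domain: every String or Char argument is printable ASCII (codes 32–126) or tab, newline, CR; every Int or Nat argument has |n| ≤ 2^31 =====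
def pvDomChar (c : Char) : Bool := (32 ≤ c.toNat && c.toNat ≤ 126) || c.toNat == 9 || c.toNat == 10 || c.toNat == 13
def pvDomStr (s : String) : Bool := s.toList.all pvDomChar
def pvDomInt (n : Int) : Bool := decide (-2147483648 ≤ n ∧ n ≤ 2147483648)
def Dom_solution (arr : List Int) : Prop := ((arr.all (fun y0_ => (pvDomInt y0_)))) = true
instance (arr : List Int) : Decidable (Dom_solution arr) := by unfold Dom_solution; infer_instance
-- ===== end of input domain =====

-- B replaces A's repeated max(arr[i+1:]) re-scans by a precomputed suffix-maximum array and one forward pass (O(n) vs O(n^2) worst case).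

-- ===== PORT A =====
def solution (arr : List Int) : Int :=
  match PySem.List.pyGet? arr 0, PySem.List.max? (PySem.List.slice arr (some 1) none) (fun v => v) with
  | some ml0, some mr0 =>
      let md0 : Int := |ml0 - mr0|
      let st := (PySem.List.pyRange 1 ((arr.length : Int) - 1) 1).foldl
        (fun (st : Int × Int × Int) i =>
          let ml := max st.1 (PySem.List.pyGetD arr i 0)
          let mr := if st.2.1 = PySem.List.pyGetD arr i 0 then
              (PySem.List.max? (PySem.List.slice arr (some (i + 1)) none) (fun v => v)).getD 0
            else st.2.1
          (ml, mr, max st.2.2 |ml - mr|))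
        (ml0, mr0, md0)
      st.2.2
  | _, _ => 0

-- ===== PORT B =====
-- backward pass of Source B: suf[i] = max(arr[i], suf[i+1]) as structural recursion
def sufList : List Int → List Int
  | [] => []
  | [x] => [x]
  | x :: y :: xs =>
      let s := sufList (y :: xs)
      max x (s.headD 0) :: s

def solution_alt (arr : List Int) : Int :=
  let suf := sufList arr
  match arr, suf with
  | a0 :: _, _ :: s1 :: s2 =>
      ((List.zip (arr.drop 1) s2).foldl
        (fun (st : Int × Int) (p : Int × Int) =>
          let pr := max st.1 p.1
          (pr, max st.2 |pr - p.2|))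
        (a0, |a0 - s1|)).2
  | _, _ => 0

-- ===== PRECONDITION & SPEC =====
-- A raises (IndexError on arr[0] / ValueError on max of empty) for lists of length < 2.
def Pre_solution (arr : List Int) : Prop := 2 ≤ arr.length
instance (arr : List Int) : Decidable (Pre_solution arr) := by unfold Pre_solution; infer_instance
def pvWitness_solution : List Int := [1, 2]

def Spec_solution (arr : List Int) (out : Int) : Prop := out = solution_alt arr
instance (arr : List Int) (out : Int) : Decidable (Spec_solution arr out) := by unfold Spec_solution; infer_instance

-- ===== CLAIM (what is proved, stated in full; the proofs are below) =====
def Claim_equal_solution : Prop := ∀ (arr : List Int), Dom_solution arr → Pre_solution arr → Spec_solution arr (solution arr)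

-- ===== LEMMAS AND PROOFS =====

/-- max of a nonempty list (0 for []) -/
def Mx : List Int → Int
  | [] => 0
  | x :: t => t.foldl max x

/-- common reference recursion: both loops step through the split points like this -/
def refGo : Int → Int → List Int → Int
  | _, best, [] => best
  | _, best, [_] => best
  | pref, best, x :: y :: xs =>
      refGo (max pref x) (max best |max pref x - Mx (y :: xs)|) (y :: xs)

lemma foldl_max_comm (t : List Int) : ∀ a b : Int, t.foldl max (max a b) = max a (t.foldl max b) := by
  induction t with
  | nil => intro a b; simp
  | cons y t ih =>
      intro a b
      simp only [List.foldl]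
      rw [max_assoc, ih]

lemma Mx_cons (x : Int) (l : List Int) (h : l ≠ []) : Mx (x :: l) = max x (Mx l) := by
  cases l with
  | nil => exact absurd rfl h
  | cons y t => simp only [Mx, List.foldl]; exact foldl_max_comm t x y

lemma max?_eq_Mx (l : List Int) (h : l ≠ []) :
    PySem.List.max? l (fun v => v) = some (Mx l) := by
  cases l with
  | nil => exact absurd rfl h
  | cons y t => rw [PySem.List.max?_id_cons]; rfl

lemma getD_append_cons (pre : List Int) (x : Int) (l : List Int) :
    (pre ++ x :: l).getD pre.length 0 = x := by
  rw [List.getD_eq_getElem?_getD, List.getElem?_append_right (Nat.le_refl pre.length)]; simp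

lemma loopA (arr : List Int) : ∀ (tail pre : List Int) (pref best : Int),
    arr = pre ++ tail → tail ≠ [] →
    (((PySem.List.pyRange (pre.length : Int) ((arr.length : Int) - 1) 1).foldl
      (fun (st : Int × Int × Int) i =>
        let ml := max st.1 (PySem.List.pyGetD arr i 0)
        let mr := if st.2.1 = PySem.List.pyGetD arr i 0 then
            (PySem.List.max? (PySem.List.slice arr (some (i + 1)) none) (fun v => v)).getD 0
          else st.2.1
        (ml, mr, max st.2.2 |ml - mr|))
      (pref, Mx tail, best)).2.2 : Int) = refGo pref best tail := by
  intro tail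
  induction tail with
  | nil => intro pre pref best _ h; exact absurd rfl h
  | cons x t ih =>
      intro pre pref best harr _
      cases t with
      | nil =>
          -- range is empty: pre.length = arr.length - 1
          have hlen : arr.length = pre.length + 1 := by simp [harr]
          rw [PySem.List.pyRange_one_eq_nil (by simp [hlen])]
          rfl
      | cons y xs =>
          have hlen : arr.length = pre.length + (xs.length + 2) := by
            simp [harr]
          have hlt : (pre.length : Int) < (arr.length : Int) - 1 := by
            rw [hlen]; push_cast; omega
          rw [PySem.List.pyRange_one_cons hlt, List.foldl_cons]
          have hget : PySem.List.pyGetD arr (pre.length : Int) 0 = x := by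
            rw [PySem.List.pyGetD_natCast, harr]; exact getD_append_cons pre x (y :: xs)
          have hdrop : arr.drop (pre.length + 1) = y :: xs := by
            have : arr = (pre ++ [x]) ++ (y :: xs) := by simp [harr]
            rw [this]
            have : pre.length + 1 = (pre ++ [x]).length := by simp
            rw [this, List.drop_left]
          have hslice : PySem.List.slice arr (some ((pre.length : Int) + 1)) none = y :: xs := by
            have : (pre.length : Int) + 1 = ((pre.length + 1 : Nat) : Int) := by push_cast; ring
            rw [this, PySem.List.slice_from_natCast, hdrop]
          have hmr : (if Mx (x :: y :: xs) = x then
              (PySem.List.max? (PySem.List.slice arr (some ((pre.length : Int) + 1)) none)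
                (fun v => v)).getD 0
            else Mx (x :: y :: xs)) = Mx (y :: xs) := by
            rw [hslice, max?_eq_Mx (y :: xs) (by simp)]
            split_ifs with hcond
            · rfl
            · have hmc := Mx_cons x (y :: xs) (by simp)
              rcases max_choice x (Mx (y :: xs)) with h | h
              · exact absurd (hmc.trans h) hcond
              · exact hmc.trans h
          simp only [hget]
          rw [hmr]
          have hcast : (pre.length : Int) + 1 = ((pre ++ [x]).length : Int) := by simp
          rw [hcast, ih (pre ++ [x]) (max pref x) (max best |max pref x - Mx (y :: xs)|)
                (by simp [harr]) (by simp)]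
          rfl

lemma sufList_cons (x : Int) (l : List Int) :
    sufList (x :: l) = Mx (x :: l) :: sufList l := by
  induction l generalizing x with
  | nil => simp [sufList, Mx]
  | cons y xs ih =>
      rw [show sufList (x :: y :: xs)
            = max x ((sufList (y :: xs)).headD 0) :: sufList (y :: xs) from rfl,
          ih y]
      simp [Mx_cons x (y :: xs) (by simp)]

lemma loopB : ∀ (t : List Int) (pref best : Int),
    ((List.zip t (sufList t.tail)).foldl
      (fun (st : Int × Int) (p : Int × Int) =>
        let pr := max st.1 p.1
        (pr, max st.2 |pr - p.2|))
      (pref, best)).2 = refGo pref best t := by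
  intro t
  induction t with
  | nil => intro pref best; rfl
  | cons x t ih =>
      intro pref best
      cases t with
      | nil => rfl
      | cons y xs =>
          rw [show (x :: y :: xs).tail = y :: xs from rfl, sufList_cons y xs,
              List.zip_cons_cons, List.foldl_cons]
          exact ih (max pref x) (max best |max pref x - Mx (y :: xs)|)

lemma solution_eq_refGo (a0 a1 : Int) (rest : List Int) :
    solution (a0 :: a1 :: rest) = refGo a0 |a0 - Mx (a1 :: rest)| (a1 :: rest) := by
  have hs : PySem.List.slice (a0 :: a1 :: rest) (some 1) none = a1 :: rest :=
    PySem.List.slice_from_one _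
  unfold solution
  rw [PySem.List.pyGet?_zero_cons, hs, max?_eq_Mx (a1 :: rest) (by simp)]
  have := loopA (a0 :: a1 :: rest) (a1 :: rest) [a0] a0 |a0 - Mx (a1 :: rest)| rfl (by simp)
  simpa using this

lemma solution_alt_eq_refGo (a0 a1 : Int) (rest : List Int) :
    solution_alt (a0 :: a1 :: rest) = refGo a0 |a0 - Mx (a1 :: rest)| (a1 :: rest) := by
  unfold solution_alt
  rw [sufList_cons a0 (a1 :: rest), sufList_cons a1 rest]
  simpa using loopB (a1 :: rest) a0 |a0 - Mx (a1 :: rest)|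

-- ===== VERDICT (by name: the statement is the Claim_ definition above) =====
theorem solution_spec : Claim_equal_solution := by
  intro arr _ hpre
  unfold Spec_solution
  match arr, hpre with
  | a0 :: a1 :: rest, _ =>
      rw [solution_eq_refGo, solution_alt_eq_refGo]
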